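-- pv_equiv track=rewrite | github.com/tuchfarber/advent_of_code | 2018.02.py | check_multiples
-- ===== SOURCE A (Python) =====
-- def check_multiples(string):
--     counts = {}
--     for char in string:
--         if char in counts:
--             counts[char] += 1
--         else:
--             counts[char] = 1
--     return set([v for _, v in counts.items() if 2 <= v <= 3])
-- ===== SOURCE B (Python) =====
-- def check_multiples(string):
--     def go(chars):
--         # peel off the first character's whole occurrence class, recurse on the rest
--         if not chars:
--             return []
--         c = chars[0]
--         n = chars.count(c)
--         rest = [x for x in chars if x != c]
--         return ([n] if 2 <= n <= 3 else []) + go(rest)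
--     return set(go(list(string)))
-- ===== Notes on version B (the rewrite author's own statement) =====
-- stated objective: alternative
-- what changed: B replaces A's single-pass dictionary accumulation with structural recursion: it repeatedly peels the first character's whole occurrence class off the string (count it once, filter it out) and recurses on the shrunken remainder, so no running dictionary or counter is ever maintained.
import Mathlib
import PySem

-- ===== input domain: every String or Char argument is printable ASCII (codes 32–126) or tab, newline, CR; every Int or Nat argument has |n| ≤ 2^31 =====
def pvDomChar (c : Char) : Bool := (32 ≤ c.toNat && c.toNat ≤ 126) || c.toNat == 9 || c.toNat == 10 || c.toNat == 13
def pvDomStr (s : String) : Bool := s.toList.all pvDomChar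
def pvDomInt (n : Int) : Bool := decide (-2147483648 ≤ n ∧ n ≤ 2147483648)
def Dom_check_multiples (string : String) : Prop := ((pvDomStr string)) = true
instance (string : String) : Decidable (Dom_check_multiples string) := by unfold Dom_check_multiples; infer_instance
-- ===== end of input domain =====

-- B replaces A's single-pass counting dictionary with structural recursion that peels one
-- character's whole occurrence class off the string at a time (alternative decomposition; not faster).

-- ===== PORT A =====
def check_multiples (string : String) : List Int :=
  let counts : PySem.Dict Char Int :=
    string.toList.foldl
      (fun counts char =>
        if counts.contains char then counts.insert char (counts.getD char 0 + 1)
        else counts.insert char 1)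
      PySem.Dict.empty
  PySem.Set.ofList
    ((counts.items.filter (fun kv => decide (2 ≤ kv.2) && decide (kv.2 ≤ 3))).map (fun kv => kv.2))

-- ===== PORT B =====
-- go(chars): count the first char once, drop its whole class, recurse on the remainder
def pv_go : List Char → List Int
  | [] => []
  | c :: cs =>
    let n : Int := (PySem.List.count (c :: cs) c : Int)
    let rest := (c :: cs).filter (fun x => !(x == c))
    (if 2 ≤ n ∧ n ≤ 3 then [n] else []) ++ pv_go rest
termination_by l => l.length
decreasing_by
  simp only [List.filter_cons, beq_self_eq_true, Bool.not_true, if_neg, Bool.false_eq_true,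
    not_false_iff]
  exact Nat.lt_succ_of_le (List.length_filter_le _ _)

def check_multiples_alt (string : String) : List Int :=
  PySem.Set.ofList (pv_go string.toList)

-- ===== PRECONDITION & SPEC =====
def Spec_check_multiples (string : String) (out : List Int) : Prop := out = check_multiples_alt string
instance (string : String) (out : List Int) : Decidable (Spec_check_multiples string out) := by unfold Spec_check_multiples; infer_instance

-- ===== CLAIM (what is proved, stated in full; the proofs are below) =====
def Claim_equal_check_multiples : Prop := ∀ (string : String), Dom_check_multiples string → Spec_check_multiples string (check_multiples string)

-- ===== LEMMAS AND PROOFS =====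

-- A's branched counting loop is Counter(xs): its two branches both insert getD+1.
theorem pv_loop_eq_counter (xs : List Char) :
    xs.foldl
      (fun (counts : PySem.Dict Char Int) char =>
        if counts.contains char then counts.insert char (counts.getD char 0 + 1)
        else counts.insert char 1)
      PySem.Dict.empty = PySem.Dict.counter xs := by
  rw [← PySem.Dict.foldl_insert_getD_add_one_eq_counter]
  congr 1
  funext d c
  by_cases h : d.contains c
  · simp [h]
  · rw [PySem.Dict.getD_of_not_contains (d := d) (k := c) (d0 := (0:Int)) (by simpa using h)]
    simp [h]

theorem pv_discard_eq_filter (s : List Char) (x : Char) :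
    PySem.Set.discard s x = s.filter (fun y => !(y == x)) := by
  simp [PySem.Set.discard]

-- first-occurrence dedup commutes with filter
theorem pv_ofList_filter (p : Char → Bool) (xs : List Char) :
    PySem.Set.ofList (xs.filter p) = (PySem.Set.ofList xs).filter p := by
  induction xs with
  | nil => rfl
  | cons x xs ih =>
    by_cases h : p x = true
    · rw [List.filter_cons_of_pos h, PySem.Set.ofList_cons, PySem.Set.ofList_cons,
        pv_discard_eq_filter, pv_discard_eq_filter, ih, List.filter_cons_of_pos h,
        List.filter_filter, List.filter_filter]
      congr 1
      apply List.filter_congr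
      intro a _
      rw [Bool.and_comm]
    · rw [List.filter_cons_of_neg (by simpa using h), PySem.Set.ofList_cons,
        List.filter_cons_of_neg (by simpa using h), pv_discard_eq_filter, ih,
        List.filter_filter]
      apply List.filter_congr
      intro a _
      by_cases hax : a = x
      · subst hax; simp [h]
      · simp [hax]

-- go peels classes off in first-occurrence order: its output is the filtered count list
theorem pv_go_eq (xs : List Char) :
    pv_go xs =
      ((PySem.Set.ofList xs).filter
          (fun k => decide (2 ≤ (xs.count k : Int)) && decide ((xs.count k : Int) ≤ 3))).map
        (fun k => (xs.count k : Int)) := by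
  induction xs using pv_go.induct with
  | case1 => simp [pv_go]
  | case2 c cs rest ih =>
    have hz : rest = cs.filter (fun x => !(x == c)) := by
      show (c :: cs).filter (fun x => !(x == c)) = _
      rw [List.filter_cons_of_neg (by simp)]
    rw [pv_go]
    simp only [PySem.List.count_eq]
    rw [show (c :: cs).filter (fun x => !(x == c)) = rest from rfl, ih, hz]
    -- counts over the filtered remainder agree with counts over the full list for k ≠ c
    have hcnt : ∀ k : Char, k ≠ c →
        (cs.filter (fun x => !(x == c))).count k = (c :: cs).count k := by
      intro k hk
      rw [List.count_filter (by simpa using hk), List.count_cons]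
      simp [Ne.symm hk]
    have hne : ∀ a ∈ PySem.Set.ofList (cs.filter (fun x => !(x == c))), a ≠ c := by
      intro a ha
      have ha2 : a ∈ cs.filter (fun x => !(x == c)) := (PySem.Set.mem_ofList _ _).mp ha
      simpa using (List.mem_filter.mp ha2).2
    -- the recursive output equals the tail of the spec list
    have htail :
        ((PySem.Set.ofList (cs.filter (fun x => !(x == c)))).filter
            (fun k => decide (2 ≤ ((cs.filter (fun x => !(x == c))).count k : Int)) &&
                      decide (((cs.filter (fun x => !(x == c))).count k : Int) ≤ 3))).map
          (fun k => ((cs.filter (fun x => !(x == c))).count k : Int)) =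
        ((PySem.Set.ofList (cs.filter (fun x => !(x == c)))).filter
            (fun k => decide (2 ≤ ((c :: cs).count k : Int)) &&
                      decide (((c :: cs).count k : Int) ≤ 3))).map
          (fun k => ((c :: cs).count k : Int)) := by
      have h1 : ∀ a ∈ PySem.Set.ofList (cs.filter (fun x => !(x == c))),
          (decide (2 ≤ ((cs.filter (fun x => !(x == c))).count a : Int)) &&
            decide (((cs.filter (fun x => !(x == c))).count a : Int) ≤ 3)) =
          (decide (2 ≤ ((c :: cs).count a : Int)) &&
            decide (((c :: cs).count a : Int) ≤ 3)) := by
        intro a ha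
        rw [hcnt a (hne a ha)]
      rw [List.filter_congr h1]
      apply List.map_congr_left
      intro a ha
      rw [hcnt a (hne a (List.mem_filter.mp ha).1)]
    rw [htail, pv_ofList_filter, PySem.Set.ofList_cons, pv_discard_eq_filter, List.filter_cons]
    by_cases hc : 2 ≤ ((c :: cs).count c : Int) ∧ ((c :: cs).count c : Int) ≤ 3
    · rw [if_pos hc, if_pos (by simp only [Bool.and_eq_true, decide_eq_true_eq]; exact hc),
        List.map_cons, List.singleton_append]
    · rw [if_neg hc, if_neg (by simp only [Bool.and_eq_true, decide_eq_true_eq]; exact hc),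
        List.nil_append]

-- ===== VERDICT (by name: the statement is the Claim_ definition above) =====
theorem check_multiples_spec : Claim_equal_check_multiples := by
  intro s _
  unfold Spec_check_multiples check_multiples check_multiples_alt
  simp only [pv_loop_eq_counter, PySem.Dict.items_counter, List.filter_map, List.map_map,
    pv_go_eq]
  rfl
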